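-- pv_equiv track=rewrite | github.com/Dan-paull/paper-visual-autoregressive-modeling-scalable-image-gen | src/var/utils.py | compute_scale_positions
-- ===== SOURCE A (Python) =====
-- from typing import List, Tuple
--
-- def get_multi_scale_patches(max_patches: int = 16) -> List[int]:
--     """
--     Generate the sequence of patch numbers for multi-scale prediction.
--
--     VAR generates images progressively from coarse to fine:
--     1x1 -> 2x2 -> 3x3 -> ... -> max_patches x max_patches
--
--     Args:
--         max_patches: Maximum number of patches per side (e.g., 16 for 16x16 grid)
--
--     Returns:
--         List of patch counts at each scale
--     """
--     return list(range(1, max_patches + 1))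
--
-- def compute_scale_positions(max_scale: int = 16) -> Tuple[List[int], List[int]]:
--     """
--     Compute start and end positions for each scale in the flattened sequence.
--
--     Args:
--         max_scale: Maximum scale (patches per side)
--
--     Returns:
--         start_positions: Starting index for each scale
--         end_positions: Ending index for each scale
--     """
--     scales = get_multi_scale_patches(max_scale)
--     start_positions = []
--     end_positions = []
--
--     cumulative = 0
--     for scale in scales:
--         num_tokens = scale * scale
--         start_positions.append(cumulative)
--         cumulative += num_tokens
--         end_positions.append(cumulative)
--
--     return start_positions, end_positions
-- ===== SOURCE B (Python) =====
-- from typing import List, Tuple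
--
-- def compute_scale_positions(max_scale: int = 16) -> Tuple[List[int], List[int]]:
--     """Closed-form: positions come from the sum-of-squares identity, no running total."""
--     starts = [(s - 1) * s * (2 * s - 1) // 6 for s in range(1, max_scale + 1)]
--     ends = [s * (s + 1) * (2 * s + 1) // 6 for s in range(1, max_scale + 1)]
--     return starts, ends
-- ===== Notes on version B (the rewrite author's own statement) =====
-- stated objective: alternative
-- what changed: Replaces the cumulative running-total loop with two independent comprehensions computing each position directly by the closed-form sum-of-squares identity s(s+1)(2s+1)/6.
import Mathlib
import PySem

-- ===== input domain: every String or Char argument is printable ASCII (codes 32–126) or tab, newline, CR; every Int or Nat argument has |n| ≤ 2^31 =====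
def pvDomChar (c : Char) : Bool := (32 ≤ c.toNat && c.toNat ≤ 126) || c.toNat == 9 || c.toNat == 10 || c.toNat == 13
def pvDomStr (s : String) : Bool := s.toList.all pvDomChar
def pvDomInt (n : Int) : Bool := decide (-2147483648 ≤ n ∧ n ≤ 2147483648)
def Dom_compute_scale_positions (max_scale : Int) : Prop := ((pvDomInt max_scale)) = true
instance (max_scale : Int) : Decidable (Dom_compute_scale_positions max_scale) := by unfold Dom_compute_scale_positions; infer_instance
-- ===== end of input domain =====

-- B replaces A's running-total loop by the closed-form sum-of-squares identity; objective: alternative (same cost, no loop state).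

-- ===== PORT A =====
-- helper of A: list(range(1, max_patches + 1))
def get_multi_scale_patches (max_patches : Int) : List Int :=
  PySem.List.pyRange 1 (max_patches + 1) 1

-- literal port of A: fold carrying (start_positions, end_positions, cumulative)
def compute_scale_positions (max_scale : Int) : List Int × List Int :=
  let scales := get_multi_scale_patches max_scale
  let st := scales.foldl
    (fun (acc : List Int × List Int × Int) scale =>
      let num_tokens := scale * scale
      (acc.1 ++ [acc.2.2], acc.2.1 ++ [acc.2.2 + num_tokens], acc.2.2 + num_tokens))
    ([], [], 0)
  (st.1, st.2.1)

-- ===== PORT B =====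
-- literal port of B: two comprehensions over range(1, max_scale+1), closed forms with //6
def compute_scale_positions_alt (max_scale : Int) : List Int × List Int :=
  ((PySem.List.pyRange 1 (max_scale + 1) 1).map
      (fun s => PySem.Int.floordiv ((s - 1) * s * (2 * s - 1)) 6),
   (PySem.List.pyRange 1 (max_scale + 1) 1).map
      (fun s => PySem.Int.floordiv (s * (s + 1) * (2 * s + 1)) 6))

-- ===== PRECONDITION & SPEC =====
def Spec_compute_scale_positions (max_scale : Int) (out : List Int × List Int) : Prop := out = compute_scale_positions_alt max_scale
instance (max_scale : Int) (out : List Int × List Int) : Decidable (Spec_compute_scale_positions max_scale out) := by unfold Spec_compute_scale_positions; infer_instance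

-- ===== CLAIM (what is proved, stated in full; the proofs are below) =====
def Claim_equal_compute_scale_positions : Prop := ∀ (max_scale : Int), Dom_compute_scale_positions max_scale → Spec_compute_scale_positions max_scale (compute_scale_positions max_scale)

-- ===== LEMMAS AND PROOFS =====

lemma six_dvd_sq_sum (n : Nat) : (6 : Int) ∣ (n : Int) * ((n : Int) + 1) * (2 * (n : Int) + 1) := by
  induction n with
  | zero => decide
  | succ m ih =>
    obtain ⟨k, hk⟩ := ih
    refine ⟨k + ((m : Int) + 1) * ((m : Int) + 1), ?_⟩
    push_cast
    linear_combination hk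

lemma floordiv_six_mul (m : Int) : PySem.Int.floordiv (6 * m) 6 = m := by
  rw [PySem.Int.floordiv_eq_ediv_of_pos (by norm_num)]
  exact Int.mul_ediv_cancel_left m (by norm_num)

-- the fold over range(1, n+1) computes exactly B's two maps, with the closed-form cumulative
lemma fold_key (n : Nat) :
    (PySem.List.pyRange 1 ((n : Int) + 1) 1).foldl
      (fun (acc : List Int × List Int × Int) scale =>
        let num_tokens := scale * scale
        (acc.1 ++ [acc.2.2], acc.2.1 ++ [acc.2.2 + num_tokens], acc.2.2 + num_tokens))
      ([], [], 0)
    = ((PySem.List.pyRange 1 ((n : Int) + 1) 1).map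
         (fun s => PySem.Int.floordiv ((s - 1) * s * (2 * s - 1)) 6),
       (PySem.List.pyRange 1 ((n : Int) + 1) 1).map
         (fun s => PySem.Int.floordiv (s * (s + 1) * (2 * s + 1)) 6),
       PySem.Int.floordiv ((n : Int) * ((n : Int) + 1) * (2 * (n : Int) + 1)) 6) := by
  induction n with
  | zero =>
    rw [PySem.List.pyRange_one_eq_nil (by norm_num)]
    simp
  | succ m ih =>
    have hsplit : PySem.List.pyRange 1 (((m + 1 : Nat) : Int) + 1) 1
        = PySem.List.pyRange 1 ((m : Int) + 1) 1 ++ [(m : Int) + 1] := by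
      push_cast
      exact PySem.List.pyRange_one_succ_right (by omega)
    obtain ⟨k, hk⟩ := six_dvd_sq_sum m
    have hcum : PySem.Int.floordiv ((m : Int) * ((m : Int) + 1) * (2 * (m : Int) + 1)) 6 = k := by
      rw [hk, floordiv_six_mul]
    have hnext : (((m : Int) + 1) * (((m : Int) + 1) + 1) * (2 * ((m : Int) + 1) + 1))
        = 6 * (k + ((m : Int) + 1) * ((m : Int) + 1)) := by linear_combination hk
    rw [hsplit, List.foldl_append, ih, List.map_append, List.map_append]
    simp only [List.foldl_cons, List.foldl_nil, List.map_cons, List.map_nil]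
    push_cast
    refine congrArg₂ Prod.mk ?_ (congrArg₂ Prod.mk ?_ ?_)
    · congr 1
      simp only [hcum]
      congr 1
      have : ((m : Int) + 1 - 1) * ((m : Int) + 1) * (2 * ((m : Int) + 1) - 1)
          = (m : Int) * ((m : Int) + 1) * (2 * (m : Int) + 1) := by ring
      rw [this, hcum]
    · congr 1
      simp only [hcum]
      congr 1
      rw [hnext, floordiv_six_mul]
    · simp only [hcum]
      rw [hnext, floordiv_six_mul]

-- ===== VERDICT (by name: the statement is the Claim_ definition above) =====
theorem compute_scale_positions_spec : Claim_equal_compute_scale_positions := by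
  intro max_scale _
  unfold Spec_compute_scale_positions compute_scale_positions compute_scale_positions_alt
    get_multi_scale_patches
  by_cases h : max_scale ≤ 0
  · rw [PySem.List.pyRange_one_eq_nil (by omega)]
    simp
  · have hn : max_scale = ((max_scale.toNat : Nat) : Int) := by omega
    rw [hn]
    simp only [fold_key max_scale.toNat]
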